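-- pv_equiv track=rewrite | github.com/elviskoci/xtable_finder | evolve/reduced_search.py | get_seed_individual
-- ===== SOURCE A (Python) =====
-- def get_seed_individual(basic_connections, parent_indices):
--     parents_basic_frags = dict()
--     # basic fragment index (denoted as bix)
--     # parent fragment index (denoted as pix)
--     for bix in range(len(parent_indices)):
--         pix = parent_indices[bix]
--         if pix not in parents_basic_frags.keys():
--             parents_basic_frags[pix] = list()
--         parents_basic_frags[pix].append(bix)
--
--     parent_connections = set()
--     for pix in parents_basic_frags.keys():
--         basic_indices = parents_basic_frags[pix]
--         for m in range(len(basic_indices)-1):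
--             for n in range(m+1, len(basic_indices)):
--                 parent_connections.add((basic_indices[m], basic_indices[n]))
--
--     seed_individ = list()
--     for bc in basic_connections:
--         if bc in parent_connections:
--             seed_individ.append(1)
--         else:
--             seed_individ.append(0)
--     return seed_individ
-- ===== SOURCE B (Python) =====
-- def get_seed_individual(basic_connections, parent_indices):
--     n = len(parent_indices)
--     return [1 if 0 <= i < j < n and parent_indices[i] == parent_indices[j] else 0
--             for (i, j) in basic_connections]
-- ===== Notes on version B (the rewrite author's own statement) =====
-- stated objective: faster
-- what changed: Instead of grouping indices by parent and materialising the set of all ordered within-group index pairs before scanning the connections, B decides each connection directly: (i, j) is marked 1 iff 0 <= i < j < len(parent_indices) and parent_indices[i] == parent_indices[j].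
import Mathlib
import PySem

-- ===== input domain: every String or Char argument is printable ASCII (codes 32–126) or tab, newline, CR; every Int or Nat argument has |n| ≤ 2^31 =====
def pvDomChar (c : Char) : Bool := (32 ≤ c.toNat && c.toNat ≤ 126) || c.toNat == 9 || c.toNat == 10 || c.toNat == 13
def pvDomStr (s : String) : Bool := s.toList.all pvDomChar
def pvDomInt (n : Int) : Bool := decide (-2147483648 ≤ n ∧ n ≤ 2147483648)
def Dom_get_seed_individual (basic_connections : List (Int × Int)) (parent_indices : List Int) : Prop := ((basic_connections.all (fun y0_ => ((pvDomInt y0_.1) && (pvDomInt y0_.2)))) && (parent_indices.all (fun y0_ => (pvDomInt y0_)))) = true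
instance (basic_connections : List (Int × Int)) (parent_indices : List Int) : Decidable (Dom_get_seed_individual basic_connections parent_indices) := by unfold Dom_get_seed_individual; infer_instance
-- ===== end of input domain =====

-- B replaces A's group-then-enumerate-all-within-group-pairs set with a direct per-connection test (a timing run measured it faster; asymptotic: no quadratic pair set is built).

-- ===== PORT A =====
def get_seed_individual (basic_connections : List (Int × Int)) (parent_indices : List Int) : List Int :=
  let parents_basic_frags : PySem.Dict Int (List Int) :=
    (PySem.List.pyRange 0 (parent_indices.length : Int) 1).foldl
      (fun d bix =>
        let pix := PySem.List.pyGetD parent_indices bix 0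
        let d := if d.contains pix then d else d.insert pix ([] : List Int)
        d.modify pix [] (fun l => l ++ [bix]))
      PySem.Dict.empty
  let parent_connections : PySem.Set (Int × Int) :=
    parents_basic_frags.keys.foldl
      (fun s pix =>
        let basic_indices := parents_basic_frags.getD pix []
        (PySem.List.pyRange 0 ((basic_indices.length : Int) - 1) 1).foldl
          (fun s m =>
            (PySem.List.pyRange (m + 1) (basic_indices.length : Int) 1).foldl
              (fun s n =>
                PySem.Set.add s (PySem.List.pyGetD basic_indices m 0, PySem.List.pyGetD basic_indices n 0))
              s)
          s)
      PySem.Set.empty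
  basic_connections.foldl
    (fun seed_individ bc =>
      if PySem.Set.contains parent_connections bc then seed_individ ++ [(1 : Int)]
      else seed_individ ++ [(0 : Int)])
    []

-- ===== PORT B =====
def get_seed_individual_alt (basic_connections : List (Int × Int)) (parent_indices : List Int) : List Int :=
  let n : Int := parent_indices.length
  basic_connections.map (fun bc =>
    if 0 ≤ bc.1 ∧ bc.1 < bc.2 ∧ bc.2 < n ∧
        PySem.List.pyGetD parent_indices bc.1 0 = PySem.List.pyGetD parent_indices bc.2 0
    then (1 : Int) else 0)

-- ===== PRECONDITION & SPEC =====
def Spec_get_seed_individual (basic_connections : List (Int × Int)) (parent_indices : List Int) (out : List Int) : Prop := out = get_seed_individual_alt basic_connections parent_indices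
instance (basic_connections : List (Int × Int)) (parent_indices : List Int) (out : List Int) : Decidable (Spec_get_seed_individual basic_connections parent_indices out) := by unfold Spec_get_seed_individual; infer_instance

-- ===== CLAIM (what is proved, stated in full; the proofs are below) =====
def Claim_equal_get_seed_individual : Prop := ∀ (basic_connections : List (Int × Int)) (parent_indices : List Int), Dom_get_seed_individual basic_connections parent_indices → Spec_get_seed_individual basic_connections parent_indices (get_seed_individual basic_connections parent_indices)

-- ===== LEMMAS AND PROOFS =====

-- proof-side name for A's dict-building loop body, applied to an (index, value) pair
def pvStep (d : PySem.Dict Int (List Int)) (q : Int × Int) : PySem.Dict Int (List Int) :=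
  let pix := q.2
  let d := if d.contains pix then d else d.insert pix ([] : List Int)
  d.modify pix [] (fun l => l ++ [q.1])

-- the list of indices (in order) whose parent value is p
def pvGrp (xs : List Int) (p : Int) : List Int :=
  ((PySem.List.enumerate xs 0).filter (fun q => q.2 == p)).map (·.1)

lemma pvStep_getD (d : PySem.Dict Int (List Int)) (q : Int × Int) (p : Int) :
    (pvStep d q).getD p [] = if p = q.2 then d.getD q.2 [] ++ [q.1] else d.getD p [] := by
  unfold pvStep
  by_cases hc : d.contains q.2
  · simp [hc, PySem.Dict.getD_modify]
  · simp only [hc, Bool.false_eq_true, if_false]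
    rw [PySem.Dict.getD_modify]
    by_cases hp : p = q.2
    · subst hp
      rw [if_pos rfl, if_pos rfl, PySem.Dict.getD_insert, if_pos rfl,
          PySem.Dict.getD_of_not_contains d [] (by simpa using hc)]
    · rw [if_neg hp, if_neg hp, PySem.Dict.getD_insert, if_neg hp]

lemma pv_build_getD (l : List (Int × Int)) (d : PySem.Dict Int (List Int)) (p : Int) :
    (l.foldl pvStep d).getD p [] = d.getD p [] ++ ((l.filter (fun q => q.2 == p)).map (·.1)) := by
  induction l generalizing d with
  | nil => simp
  | cons q t ih =>
      simp only [List.foldl_cons, ih, pvStep_getD]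
      by_cases hp : p = q.2
      · simp [hp]
      · have hqp : ¬ q.2 = p := fun h => hp h.symm
        simp [hp, hqp]

lemma pvStep_keys_mem (d : PySem.Dict Int (List Int)) (q : Int × Int) (p : Int) :
    p ∈ (pvStep d q).keys ↔ p ∈ d.keys ∨ p = q.2 := by
  unfold pvStep
  by_cases hc : d.contains q.2
  · simp only [hc, if_true]
    rw [PySem.Dict.keys_modify, PySem.Dict.mem_keys_insert]
    tauto
  · simp only [hc, Bool.false_eq_true, if_false]
    rw [PySem.Dict.keys_modify, PySem.Dict.mem_keys_insert, PySem.Dict.mem_keys_insert]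
    tauto

lemma pv_build_keys_mem (l : List (Int × Int)) (d : PySem.Dict Int (List Int)) (p : Int) :
    p ∈ (l.foldl pvStep d).keys ↔ p ∈ d.keys ∨ ∃ q ∈ l, p = q.2 := by
  induction l generalizing d with
  | nil => simp
  | cons q t ih =>
      simp only [List.foldl_cons, ih, pvStep_keys_mem]
      constructor
      · rintro ((h | h) | ⟨b, hb, rfl⟩)
        · exact Or.inl h
        · exact Or.inr ⟨q, by simp, h⟩
        · exact Or.inr ⟨b, by simp [hb], rfl⟩
      · rintro (h | ⟨b, hb, rfl⟩)
        · exact Or.inl (Or.inl h)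
        · rcases List.mem_cons.mp hb with rfl | hb
          · exact Or.inl (Or.inr rfl)
          · exact Or.inr ⟨b, hb, rfl⟩

-- generic membership through a fold whose step adds exactly the elements characterised by P
lemma pv_mem_foldl {α β : Type} [BEq α] (step : PySem.Set α → β → PySem.Set α)
    (P : β → α → Prop) (h : ∀ s b y, y ∈ step s b ↔ y ∈ s ∨ P b y) :
    ∀ (l : List β) (s : PySem.Set α) (y : α), y ∈ l.foldl step s ↔ y ∈ s ∨ ∃ b ∈ l, P b y := by
  intro l
  induction l with
  | nil => simp
  | cons b t ih =>
      intro s y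
      rw [List.foldl_cons, ih, h]
      constructor
      · rintro ((h1 | h1) | ⟨c, hc, h1⟩)
        · exact Or.inl h1
        · exact Or.inr ⟨b, by simp, h1⟩
        · exact Or.inr ⟨c, by simp [hc], h1⟩
      · rintro (h1 | ⟨c, hc, h1⟩)
        · exact Or.inl (Or.inl h1)
        · rcases List.mem_cons.mp hc with rfl | hc
          · exact Or.inl (Or.inr h1)
          · exact Or.inr ⟨c, hc, h1⟩

lemma pv_mem_grp (xs : List Int) (p c : Int) :
    c ∈ pvGrp xs p ↔ 0 ≤ c ∧ c < (xs.length : Int) ∧ PySem.List.pyGetD xs c 0 = p := by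
  unfold pvGrp
  simp only [List.mem_map, List.mem_filter, PySem.List.mem_enumerate_iff]
  constructor
  · rintro ⟨⟨i, v⟩, ⟨⟨k, hk, hq⟩, hv⟩, rfl⟩
    have h1 : i = (0 : Int) + (k : Int) := congrArg Prod.fst hq
    have h2 : v = xs[k] := congrArg Prod.snd hq
    dsimp only
    rw [h1, zero_add]
    refine ⟨by positivity, by exact_mod_cast hk, ?_⟩
    rw [PySem.List.pyGetD_eq_getElem xs 0 (by positivity) (by exact_mod_cast hk)]
    simpa [Int.toNat_natCast, ← h2] using beq_iff_eq.mp hv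
  · rintro ⟨h0, hlt, hval⟩
    refine ⟨(c, p), ⟨⟨c.toNat, by omega, ?_⟩, by simp⟩, rfl⟩
    rw [← hval, PySem.List.pyGetD_eq_getElem xs 0 h0 hlt]
    simp [Int.toNat_of_nonneg h0]

lemma pv_pairwise_grp (xs : List Int) (p : Int) : (pvGrp xs p).Pairwise (· < ·) := by
  unfold pvGrp
  exact List.Pairwise.map _ (fun a b h => h)
    ((PySem.List.pairwise_lt_enumerate xs 0).filter _)

-- both nested inner loops of A, over one group g: membership characterisation
lemma pv_inner_mem (g : List Int) (s : PySem.Set (Int × Int)) (y : Int × Int) :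
    y ∈ (PySem.List.pyRange 0 ((g.length : Int) - 1) 1).foldl
          (fun s m =>
            (PySem.List.pyRange (m + 1) (g.length : Int) 1).foldl
              (fun s n => PySem.Set.add s (PySem.List.pyGetD g m 0, PySem.List.pyGetD g n 0)) s) s ↔
      y ∈ s ∨ ∃ m, (0 ≤ m ∧ m < (g.length : Int) - 1) ∧ ∃ n, (m + 1 ≤ n ∧ n < (g.length : Int)) ∧
        y = (PySem.List.pyGetD g m 0, PySem.List.pyGetD g n 0) := by
  rw [pv_mem_foldl _ (fun m y => ∃ n, (m + 1 ≤ n ∧ n < (g.length : Int)) ∧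
        y = (PySem.List.pyGetD g m 0, PySem.List.pyGetD g n 0))
      (fun s m y => by
        rw [pv_mem_foldl _ (fun n y => y = (PySem.List.pyGetD g m 0, PySem.List.pyGetD g n 0))
            (fun s n y => PySem.Set.mem_add s _ y) _ s y]
        simp [PySem.List.mem_pyRange_one])]
  simp [PySem.List.mem_pyRange_one]

-- the pair (a,b) is produced from the strictly increasing group g iff a,b ∈ g and a < b
lemma pv_pair_of_grp (g : List Int) (hg : g.Pairwise (· < ·)) (a b : Int) :
    (∃ m, (0 ≤ m ∧ m < (g.length : Int) - 1) ∧ ∃ n, (m + 1 ≤ n ∧ n < (g.length : Int)) ∧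
        (a, b) = (PySem.List.pyGetD g m 0, PySem.List.pyGetD g n 0)) ↔
      a ∈ g ∧ b ∈ g ∧ a < b := by
  constructor
  · rintro ⟨m, ⟨hm0, hm1⟩, n, ⟨hn0, hn1⟩, he⟩
    have ha : a = PySem.List.pyGetD g m 0 := congrArg Prod.fst he
    have hb : b = PySem.List.pyGetD g n 0 := congrArg Prod.snd he
    have hmn : m < n := by omega
    rw [PySem.List.pyGetD_eq_getElem g 0 hm0 (by omega)] at ha
    rw [PySem.List.pyGetD_eq_getElem g 0 (by omega) hn1] at hb
    have hmlt : m.toNat < g.length := by omega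
    have hnlt : n.toNat < g.length := by omega
    have hlt : g[m.toNat] < g[n.toNat] :=
      List.pairwise_iff_getElem.mp hg m.toNat n.toNat hmlt hnlt (by omega)
    rw [ha, hb]
    exact ⟨List.getElem_mem _, List.getElem_mem _, hlt⟩
  · rintro ⟨ha, hb, hab⟩
    obtain ⟨i, hi, hia⟩ := List.mem_iff_getElem.mp ha
    obtain ⟨j, hj, hjb⟩ := List.mem_iff_getElem.mp hb
    have hij : i < j := by
      by_contra hle
      rcases Nat.lt_or_ge j i with hji | hge
      · have := List.pairwise_iff_getElem.mp hg j i hj hi hji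
        omega
      · have : i = j := by omega
        subst this; omega
    refine ⟨(i : Int), ⟨by positivity, by omega⟩, (j : Int), ⟨by omega, by exact_mod_cast hj⟩, ?_⟩
    rw [PySem.List.pyGetD_eq_getElem g 0 (by positivity) (by exact_mod_cast hi),
        PySem.List.pyGetD_eq_getElem g 0 (by positivity) (by exact_mod_cast hj)]
    simp only [Int.toNat_natCast]
    exact Prod.ext_iff.mpr ⟨hia.symm, hjb.symm⟩

-- ===== VERDICT (by name: the statement is the Claim_ definition above) =====
theorem get_seed_individual_spec : Claim_equal_get_seed_individual := by
  intro bcs xs _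
  unfold Spec_get_seed_individual get_seed_individual get_seed_individual_alt
  -- name the built dict and rewrite the build fold into the enumerate form
  have hfold :
      (PySem.List.pyRange 0 (xs.length : Int) 1).foldl
        (fun d bix =>
          let pix := PySem.List.pyGetD xs bix 0
          let d := if d.contains pix then d else d.insert pix ([] : List Int)
          d.modify pix [] (fun l => l ++ [bix]))
        PySem.Dict.empty
      = (PySem.List.enumerate xs 0).foldl pvStep PySem.Dict.empty := by
    rw [PySem.List.enumerate_eq_map_pyRange xs 0, List.foldl_map]
    rfl
  rw [hfold]
  set D := (PySem.List.enumerate xs 0).foldl pvStep PySem.Dict.empty with hD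
  have hDget : ∀ p, D.getD p [] = pvGrp xs p := by
    intro p
    rw [hD, pv_build_getD]
    simp [pvGrp]
  have hDkeys : ∀ p, p ∈ D.keys ↔ ∃ q ∈ PySem.List.enumerate xs 0, p = q.2 := by
    intro p
    rw [hD, pv_build_keys_mem]
    simp
  simp only [hDget]
  -- characterise the pair set
  have hS : ∀ a b : Int,
      ((a, b) ∈ D.keys.foldl
        (fun s pix =>
          (PySem.List.pyRange 0 (((pvGrp xs pix).length : Int) - 1) 1).foldl
            (fun s m =>
              (PySem.List.pyRange (m + 1) ((pvGrp xs pix).length : Int) 1).foldl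
                (fun s n =>
                  PySem.Set.add s (PySem.List.pyGetD (pvGrp xs pix) m 0, PySem.List.pyGetD (pvGrp xs pix) n 0)) s) s)
        PySem.Set.empty)
      ↔ (0 ≤ a ∧ a < b ∧ b < (xs.length : Int) ∧
          PySem.List.pyGetD xs a 0 = PySem.List.pyGetD xs b 0) := by
    intro a b
    rw [pv_mem_foldl _
        (fun pix y => ∃ m, (0 ≤ m ∧ m < ((pvGrp xs pix).length : Int) - 1) ∧
          ∃ n, (m + 1 ≤ n ∧ n < ((pvGrp xs pix).length : Int)) ∧
            y = (PySem.List.pyGetD (pvGrp xs pix) m 0, PySem.List.pyGetD (pvGrp xs pix) n 0))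
        (fun s pix y => pv_inner_mem (pvGrp xs pix) s y)]
    simp only [PySem.Set.empty, List.not_mem_nil, false_or]
    constructor
    · rintro ⟨p, hp, hpair⟩
      obtain ⟨ha, hb, hab⟩ := (pv_pair_of_grp _ (pv_pairwise_grp xs p) a b).mp hpair
      obtain ⟨ha0, ha1, hav⟩ := (pv_mem_grp xs p a).mp ha
      obtain ⟨hb0, hb1, hbv⟩ := (pv_mem_grp xs p b).mp hb
      exact ⟨ha0, hab, hb1, by rw [hav, hbv]⟩
    · rintro ⟨ha0, hab, hb1, heq⟩
      refine ⟨PySem.List.pyGetD xs a 0, ?_, ?_⟩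
      · rw [hDkeys]
        have hlt : a.toNat < xs.length := by omega
        refine ⟨(a, xs[a.toNat]), ?_, ?_⟩
        · rw [PySem.List.mem_enumerate_iff]
          exact ⟨a.toNat, hlt, by simp [Int.toNat_of_nonneg ha0]⟩
        · simp [PySem.List.pyGetD_eq_getElem xs 0 ha0 (by omega)]
      · refine (pv_pair_of_grp _ (pv_pairwise_grp xs _) a b).mpr ?_
        refine ⟨(pv_mem_grp xs _ a).mpr ⟨ha0, by omega, rfl⟩,
                (pv_mem_grp xs _ b).mpr ⟨by omega, hb1, heq.symm⟩, hab⟩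
  -- rewrite the output loop into a map and compare elementwise
  have hbody : (fun (seed_individ : List Int) (bc : Int × Int) =>
      if PySem.Set.contains
          (D.keys.foldl
            (fun s pix =>
              (PySem.List.pyRange 0 (((pvGrp xs pix).length : Int) - 1) 1).foldl
                (fun s m =>
                  (PySem.List.pyRange (m + 1) ((pvGrp xs pix).length : Int) 1).foldl
                    (fun s n =>
                      PySem.Set.add s (PySem.List.pyGetD (pvGrp xs pix) m 0, PySem.List.pyGetD (pvGrp xs pix) n 0)) s) s)
            PySem.Set.empty) bc
      then seed_individ ++ [(1 : Int)] else seed_individ ++ [(0 : Int)]) =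
      fun seed_individ bc => seed_individ ++
        [if 0 ≤ bc.1 ∧ bc.1 < bc.2 ∧ bc.2 < (xs.length : Int) ∧
            PySem.List.pyGetD xs bc.1 0 = PySem.List.pyGetD xs bc.2 0 then (1 : Int) else 0] := by
    funext acc bc
    obtain ⟨a, b⟩ := bc
    by_cases hg : 0 ≤ a ∧ a < b ∧ b < (xs.length : Int) ∧
        PySem.List.pyGetD xs a 0 = PySem.List.pyGetD xs b 0
    · rw [if_pos ((PySem.Set.contains_iff _ _).mpr ((hS a b).mpr hg)), if_pos hg]
    · rw [if_neg (fun hc => hg ((hS a b).mp ((PySem.Set.contains_iff _ _).mp hc))),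
          if_neg hg]
  rw [hbody, PySem.List.foldl_append_singleton_eq_map]
  simp
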